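-- pv_equiv track=rewrite | github.com/DenisLopushanskiy/Fundamental-and-Technical-Analysis-for-Capital-Markets-Indices-Hedging-Using-Options | days_to_exec.py | get_condition_type2
-- ===== SOURCE A (Python) =====
-- import copy
--
-- def get_condition_type2(FACondRaw):
--      '''Upgrades raw condition from FA indicator. Adds 32 periods to the signal before the expiration (type 2 condition).
--      :FACondRaw: initital condition from FA indicator
--      :output: list with upgraded periods for option calculation
--      '''
--      firstZeros = [ind for ind, x in enumerate(FACondRaw) if (FACondRaw[ind]==0 and FACondRaw[ind-1]==1)]#where to add list with units
--      periodForSubsitution = 32#32 days (1.5 month) to add to initial condition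
--      condFAType2 = copy.copy(FACondRaw)
--      for ind, x in enumerate(firstZeros):
--           condFAType2[x:x + periodForSubsitution] = [1] * periodForSubsitution
--           condFAType2 = condFAType2[0:len(FACondRaw)]#in the case if length of substitution goes further than the sample size
--      return condFAType2
-- ===== SOURCE B (Python) =====
-- def get_condition_type2(FACondRaw):
--     out = []
--     prev = None
--     remaining = 0
--     for x in FACondRaw:
--         if prev == 1 and x == 0:
--             remaining = 32
--         if remaining > 0:
--             out.append(1)
--             remaining -= 1
--         else:
--             out.append(x)
--         prev = x
--     return out
-- ===== Notes on version B (the rewrite author's own statement) =====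
-- stated objective: faster
-- what changed: Replaced the two-pass edge-list + repeated slice-assignment-and-truncate (each O(n)) with a single streaming pass that keeps a 32-period countdown counter and the previous element.
-- intended difference: On lists whose first element is 0 and last element is 1, A's negative-index wraparound (FACondRaw[-1]) treats index 0 as a falling edge and returns the first min(32,n) positions forced to 1, while B leaves them as the original values; B is intended because position 0 has no preceding period, so no signal expired there. — e.g. on get_condition_type2([0, 1]): A returns [1, 1], B returns [0, 1]
import Mathlib
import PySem

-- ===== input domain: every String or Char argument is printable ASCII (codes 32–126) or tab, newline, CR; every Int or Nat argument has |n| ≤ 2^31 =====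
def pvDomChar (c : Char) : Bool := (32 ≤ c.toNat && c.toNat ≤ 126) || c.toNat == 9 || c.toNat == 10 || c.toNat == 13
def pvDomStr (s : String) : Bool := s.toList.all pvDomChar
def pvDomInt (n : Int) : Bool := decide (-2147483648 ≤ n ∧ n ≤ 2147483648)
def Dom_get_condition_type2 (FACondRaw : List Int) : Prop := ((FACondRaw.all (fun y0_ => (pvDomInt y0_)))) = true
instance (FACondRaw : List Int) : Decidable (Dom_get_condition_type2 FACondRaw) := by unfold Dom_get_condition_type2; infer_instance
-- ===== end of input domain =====

-- B replaces A's edge-list + per-edge slice-assignment/truncation passes with one streaming pass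
-- keeping a 32-period countdown counter (objective: faster — one pass, no per-edge list copies).


-- ===== PORT A =====
-- Slice assignment 'cond[x:x+32] = [1]*32' followed by 'cond[0:len]' is ported by hand as
-- take/append/drop then take (exact here: every x comes from enumerate, hence 0 ≤ x).
def get_condition_type2 (FACondRaw : List Int) : List Int :=
  let firstZeros : List Int :=
    (PySem.List.enumerate FACondRaw).filterMap (fun p =>
      if PySem.List.pyGet? FACondRaw p.1 = some 0 ∧ PySem.List.pyGet? FACondRaw (p.1 - 1) = some 1
      then some p.1 else none)
  firstZeros.foldl
    (fun cond x =>
      (cond.take x.toNat ++ List.replicate 32 1 ++ cond.drop (x.toNat + 32)).take FACondRaw.length)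
    FACondRaw

-- ===== PORT B =====
-- Streaming pass: state = (output built so far, previous element, countdown of positions still to force to 1).
def get_condition_type2_alt (FACondRaw : List Int) : List Int :=
  (FACondRaw.foldl
    (fun (st : List Int × Option Int × Int) x =>
      let rem : Int := if st.2.1 = some 1 ∧ x = 0 then 32 else st.2.2
      if rem > 0 then (st.1 ++ [1], some x, rem - 1)
      else (st.1 ++ [x], some x, rem))
    ([], none, 0)).1

-- ===== PRECONDITION & SPEC =====
-- On lists whose first element is 0 and last element is 1, A's negative-index wraparound
-- (FACondRaw[-1]) treats index 0 as a falling edge and forces the first min(32,n) positions to 1,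
-- while B leaves them as the original values; B is intended because position 0 has no preceding
-- period, so no signal expired there.
def D_get_condition_type2 (FACondRaw : List Int) : Prop :=
  FACondRaw[0]? = some 0 ∧ FACondRaw.getLast? = some 1
instance (FACondRaw : List Int) : Decidable (D_get_condition_type2 FACondRaw) := by
  unfold D_get_condition_type2; infer_instance
def Spec_get_condition_type2 (FACondRaw : List Int) (out : List Int) : Prop :=
  ¬ D_get_condition_type2 FACondRaw → out = get_condition_type2_alt FACondRaw
instance (FACondRaw : List Int) (out : List Int) : Decidable (Spec_get_condition_type2 FACondRaw out) := by
  unfold Spec_get_condition_type2; infer_instance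
def pvDiffWitness_get_condition_type2 : List Int := [0, 1]
def pvDiffWitnessOut_get_condition_type2 : (List Int) × (List Int) := ([1, 1], [0, 1])

-- ===== CLAIM (what is proved, stated in full; the proofs are below) =====
def Claim_unchanged_get_condition_type2 : Prop := ∀ (FACondRaw : List Int), Dom_get_condition_type2 FACondRaw → Spec_get_condition_type2 FACondRaw (get_condition_type2 FACondRaw)
def Claim_changed_get_condition_type2 : Prop := Dom_get_condition_type2 (pvDiffWitness_get_condition_type2) ∧ D_get_condition_type2 (pvDiffWitness_get_condition_type2) ∧ get_condition_type2 (pvDiffWitness_get_condition_type2) = pvDiffWitnessOut_get_condition_type2.1 ∧ get_condition_type2_alt (pvDiffWitness_get_condition_type2) = pvDiffWitnessOut_get_condition_type2.2 ∧ pvDiffWitnessOut_get_condition_type2.1 ≠ pvDiffWitnessOut_get_condition_type2.2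
def Claim_exact_get_condition_type2 : Prop := ∀ (FACondRaw : List Int), Dom_get_condition_type2 FACondRaw → D_get_condition_type2 FACondRaw → get_condition_type2 FACondRaw ≠ get_condition_type2_alt FACondRaw

-- ===== LEMMAS AND PROOFS =====

-- falling edge at absolute position j, with `prev` the element just before the list (none at the start)
def pvEdgeB (prev : Option Int) (ys : List Int) : Nat → Bool
  | 0 => ys[0]? == some (0 : Int) && prev == some 1
  | j+1 => ys[j+1]? == some (0 : Int) && ys[j]? == some 1

-- position i is forced to 1: some edge j ≤ i still covers it, or the incoming countdown does
def pvCovB (prev : Option Int) (rem : Int) (ys : List Int) (i : Nat) : Bool :=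
  (List.range (i+1)).any (fun j => pvEdgeB prev ys j && decide (i < j + 32)) || decide ((i : Int) < rem)

-- structural recursion equal to B's loop (bridge: pv_alt_eq_bref)
def pvBref : List Int → Option Int → Int → List Int
  | [], _, _ => []
  | x :: ys, prev, rem =>
    let rem1 : Int := if prev = some 1 ∧ x = 0 then 32 else rem
    if rem1 > 0 then 1 :: pvBref ys (some x) (rem1 - 1)
    else x :: pvBref ys (some x) rem1

lemma pv_alt_eq_bref (ys : List Int) : ∀ (out : List Int) (prev : Option Int) (rem : Int),
    (ys.foldl
      (fun (st : List Int × Option Int × Int) x =>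
        let r : Int := if st.2.1 = some 1 ∧ x = 0 then 32 else st.2.2
        if r > 0 then (st.1 ++ [1], some x, r - 1)
        else (st.1 ++ [x], some x, r))
      (out, prev, rem)).1 = out ++ pvBref ys prev rem := by
  induction ys with
  | nil => simp [pvBref]
  | cons x ys ih =>
    intro out prev rem
    simp only [List.foldl_cons, pvBref]
    by_cases h : (if prev = some 1 ∧ x = 0 then (32:Int) else rem) > 0 <;>
      simp [h, ih]

lemma pv_bref_length (ys : List Int) : ∀ (prev : Option Int) (rem : Int),
    (pvBref ys prev rem).length = ys.length := by
  induction ys with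
  | nil => intro _ _; simp [pvBref]
  | cons x ys ih =>
    intro prev rem
    simp only [pvBref]
    by_cases h : (if prev = some 1 ∧ x = 0 then (32:Int) else rem) > 0 <;> simp [h, ih]

lemma pvEdgeB_cons (prev : Option Int) (x : Int) (ys : List Int) (j : Nat) :
    pvEdgeB prev (x :: ys) (j+1) = pvEdgeB (some x) ys j := by
  cases j <;> simp [pvEdgeB]

lemma pvCovB_cons (prev : Option Int) (x : Int) (ys : List Int) (rem : Int) (i : Nat)
    (h0 : 0 ≤ rem) (h32 : rem ≤ 32) :
    pvCovB (some x) (if (if prev = some 1 ∧ x = 0 then (32:Int) else rem) > 0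
                     then (if prev = some 1 ∧ x = 0 then (32:Int) else rem) - 1
                     else (if prev = some 1 ∧ x = 0 then (32:Int) else rem)) ys i
      = pvCovB prev rem (x :: ys) (i+1) := by
  rw [Bool.eq_iff_iff]
  by_cases hp : prev = some 1 ∧ x = 0 <;>
    simp only [pvCovB, hp, if_true, if_false, List.any_eq_true, List.mem_range,
      Bool.or_eq_true, Bool.and_eq_true, decide_eq_true_eq]
  · constructor
    · rintro (⟨j, hj, he, hc⟩ | hr)
      · exact Or.inl ⟨j+1, by omega, by rwa [pvEdgeB_cons], by omega⟩
      · refine Or.inl ⟨0, by omega, ?_, by omega⟩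
        simp [pvEdgeB, hp.1, hp.2]
    · rintro (⟨j, hj, he, hc⟩ | hr)
      · cases j with
        | zero => norm_num at *; omega
        | succ j' => exact Or.inl ⟨j', by omega, by rwa [pvEdgeB_cons] at he, by omega⟩
      · norm_num at *; omega
  · have hpos : ((32:Int) > 0) := by norm_num
    constructor
    · rintro (⟨j, hj, he, hc⟩ | hr)
      · exact Or.inl ⟨j+1, by omega, by rwa [pvEdgeB_cons], by omega⟩
      · right
        by_cases hq : rem > 0 <;> simp [hq] at hr <;> push_cast <;> push_cast at hr <;> omega
    · rintro (⟨j, hj, he, hc⟩ | hr)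
      · cases j with
        | zero =>
          exfalso
          simp [pvEdgeB] at he
          exact hp ⟨he.2, he.1⟩
        | succ j' => exact Or.inl ⟨j', by omega, by rwa [pvEdgeB_cons] at he, by omega⟩
      · right
        have hq : rem > 0 := by push_cast at hr; omega
        simp [hq]
        push_cast at hr ⊢
        omega

lemma pv_bref_get (ys : List Int) : ∀ (prev : Option Int) (rem : Int) (i : Nat),
    0 ≤ rem → rem ≤ 32 → i < ys.length →
    (pvBref ys prev rem)[i]? = if pvCovB prev rem ys i then some 1 else ys[i]? := by
  induction ys with
  | nil => intro _ _ i _ _ h; simp at h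
  | cons x ys ih =>
    intro prev rem i h0 h32 hi
    cases i with
    | zero =>
      by_cases hp : prev = some 1 ∧ x = 0
      · simp [pvBref, pvCovB, pvEdgeB, hp.1, hp.2]
      · by_cases hq : rem > 0 <;>
          simp [pvBref, pvCovB, pvEdgeB, hp, hq, List.range_succ] <;>
          first
            | rfl
            | (intro h1 h2; exact absurd ⟨h2, h1⟩ hp)
    | succ i' =>
      have hrec := ih (some x)
        (if (if prev = some 1 ∧ x = 0 then (32:Int) else rem) > 0
         then (if prev = some 1 ∧ x = 0 then (32:Int) else rem) - 1
         else (if prev = some 1 ∧ x = 0 then (32:Int) else rem)) i'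
        (by by_cases hp : prev = some 1 ∧ x = 0 <;> simp [hp] <;> by_cases hq : rem > 0 <;> simp [hq] <;> omega)
        (by by_cases hp : prev = some 1 ∧ x = 0 <;> simp [hp] <;> by_cases hq : rem > 0 <;> simp [hq] <;> omega)
        (by simpa using hi)
      rw [← pvCovB_cons prev x ys rem i' h0 h32] at *
      simp only [pvBref]
      by_cases hp : (if prev = some 1 ∧ x = 0 then (32:Int) else rem) > 0 <;>
        simp only [hp, if_true, if_false] at hrec <;>
        simp only [pvBref, hp, if_true, if_false, List.getElem?_cons_succ] <;>
        exact hrec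

lemma pv_step_length (cond : List Int) (x n : Nat) (hc : cond.length = n) (hx : x < n) :
    ((cond.take x ++ List.replicate 32 (1:Int) ++ cond.drop (x + 32)).take n).length = n := by
  simp [List.length_take, hc]
  omega

lemma pv_step_get (cond : List Int) (x n i : Nat) (hc : cond.length = n) (hx : x < n) (hi : i < n) :
    ((cond.take x ++ List.replicate 32 (1:Int) ++ cond.drop (x + 32)).take n)[i]? =
      if x ≤ i ∧ i < x + 32 then some 1 else cond[i]? := by
  rw [List.getElem?_take_of_lt hi]
  rcases Nat.lt_or_ge i x with h1 | h1
  · rw [List.getElem?_append_left (by simp [List.length_take]; omega),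
      List.getElem?_append_left (by simp [List.length_take]; omega),
      List.getElem?_take_of_lt h1]
    simp; omega
  · rcases Nat.lt_or_ge i (x + 32) with h2 | h2
    · rw [List.getElem?_append_left (by simp [List.length_take]; omega),
        List.getElem?_append_right (by simp [List.length_take]; omega)]
      rw [List.length_take, List.getElem?_replicate]
      rw [if_pos (by omega), if_pos (by omega)]
    · rw [List.getElem?_append_right (by simp [List.length_take]; omega)]
      simp only [List.length_append, List.length_take, List.length_replicate]
      rw [List.getElem?_drop]
      have : x + 32 + (i - (min x cond.length + 32)) = i := by omega
      rw [this]
      simp; omega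

lemma pv_foldA (n : Nat) (l : List Int) : ∀ (cond : List Int), cond.length = n →
    (∀ x ∈ l, 0 ≤ x ∧ x.toNat < n) →
    ((l.foldl (fun cond x =>
        (cond.take x.toNat ++ List.replicate 32 (1:Int) ++ cond.drop (x.toNat + 32)).take n)
        cond).length = n ∧
     ∀ i, i < n →
      (l.foldl (fun cond x =>
        (cond.take x.toNat ++ List.replicate 32 (1:Int) ++ cond.drop (x.toNat + 32)).take n)
        cond)[i]? =
        if l.any (fun x => decide (x.toNat ≤ i ∧ i < x.toNat + 32)) then some 1 else cond[i]?) := by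
  induction l with
  | nil => intro cond hc _; simpa using hc
  | cons x l ih =>
    intro cond hc hl
    have hx := hl x (by simp)
    have hstep : ((cond.take x.toNat ++ List.replicate 32 (1:Int) ++ cond.drop (x.toNat + 32)).take n).length = n :=
      pv_step_length cond x.toNat n hc hx.2
    obtain ⟨hlen, hget⟩ := ih _ hstep (fun y hy => hl y (by simp [hy]))
    refine ⟨by simpa using hlen, ?_⟩
    intro i hi
    rw [List.foldl_cons] at *
    rw [hget i hi, pv_step_get cond x.toNat n i hc hx.2 hi]
    rw [List.any_cons]
    cases hb : l.any (fun y => decide (y.toNat ≤ i ∧ i < y.toNat + 32))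
    · rw [if_neg (by simp), Bool.or_false]
      by_cases hp : x.toNat ≤ i ∧ i < x.toNat + 32 <;> simp [hp]
    · rw [Bool.or_true, if_pos rfl, if_pos rfl]

lemma pv_mem_firstZeros (xs : List Int) (x : Int) :
    x ∈ (PySem.List.enumerate xs).filterMap (fun p =>
      if PySem.List.pyGet? xs p.1 = some 0 ∧ PySem.List.pyGet? xs (p.1 - 1) = some 1
      then some p.1 else none) ↔
    ∃ k : Nat, k < xs.length ∧ x = (k : Int) ∧
      PySem.List.pyGet? xs (k : Int) = some 0 ∧ PySem.List.pyGet? xs ((k : Int) - 1) = some 1 := by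
  simp only [List.mem_filterMap, PySem.List.mem_enumerate_iff]
  constructor
  · rintro ⟨p, ⟨k, hk, rfl⟩, hp⟩
    simp only [zero_add] at hp
    split_ifs at hp with h
    · cases hp
      exact ⟨k, hk, rfl, h.1, h.2⟩
  · rintro ⟨k, hk, rfl, h0, h1⟩
    exact ⟨((k : Int), xs[k]), ⟨k, hk, by simp⟩, by simp [h0, h1]⟩

lemma pv_mem_firstZeros_of_notD (xs : List Int) (hD : ¬ D_get_condition_type2 xs) (x : Int) :
    x ∈ (PySem.List.enumerate xs).filterMap (fun p =>
      if PySem.List.pyGet? xs p.1 = some 0 ∧ PySem.List.pyGet? xs (p.1 - 1) = some 1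
      then some p.1 else none) ↔
    0 ≤ x ∧ x.toNat < xs.length ∧ pvEdgeB none xs x.toNat = true := by
  rw [pv_mem_firstZeros]
  constructor
  · rintro ⟨k, hk, rfl, h0, h1⟩
    cases k with
    | zero =>
      exfalso
      apply hD
      constructor
      · rw [← PySem.List.pyGet?_zero xs]; simpa using h0
      · rw [← PySem.List.pyGet?_neg_one xs]; simpa using h1
    | succ j =>
      refine ⟨by positivity, by simpa using hk, ?_⟩
      have e1 : ((j+1 : Nat) : Int) - 1 = (j : Int) := by push_cast; ring
      rw [e1, PySem.List.pyGet?_natCast] at h1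
      rw [PySem.List.pyGet?_natCast] at h0
      simp [pvEdgeB, h0, h1]
  · rintro ⟨hx0, hxn, he⟩
    have hxe : x = ((x.toNat : Nat) : Int) := by omega
    cases hn : x.toNat with
    | zero => rw [hn] at he; simp [pvEdgeB] at he
    | succ j =>
      rw [hn] at he
      simp only [pvEdgeB, Bool.and_eq_true, beq_iff_eq] at he
      refine ⟨j+1, by omega, by omega, ?_, ?_⟩
      · rw [PySem.List.pyGet?_natCast]; exact he.1
      · have e1 : ((j+1 : Nat) : Int) - 1 = (j : Int) := by push_cast; ring
        rw [e1, PySem.List.pyGet?_natCast]; exact he.2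

lemma pv_edge_of_mem (xs : List Int) (j : Nat) (h : pvEdgeB none xs j = true) :
    1 ≤ j ∧ j < xs.length := by
  cases j with
  | zero => simp [pvEdgeB] at h
  | succ j =>
    simp only [pvEdgeB, Bool.and_eq_true, beq_iff_eq] at h
    have := List.getElem?_eq_some_iff.mp h.1
    exact ⟨by omega, this.1⟩

lemma pv_alt_eq (xs : List Int) : get_condition_type2_alt xs = pvBref xs none 0 := by
  rw [get_condition_type2_alt]
  rw [pv_alt_eq_bref xs [] none 0, List.nil_append]

lemma pv_cov_eq_any (xs : List Int) (hD : ¬ D_get_condition_type2 xs) (i : Nat) :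
    ((PySem.List.enumerate xs).filterMap (fun p =>
      if PySem.List.pyGet? xs p.1 = some 0 ∧ PySem.List.pyGet? xs (p.1 - 1) = some 1
      then some p.1 else none)).any (fun x => decide (x.toNat ≤ i ∧ i < x.toNat + 32))
    = pvCovB none 0 xs i := by
  rw [Bool.eq_iff_iff]
  simp only [List.any_eq_true, decide_eq_true_eq, pvCovB, Bool.or_eq_true, List.mem_range,
    Bool.and_eq_true]
  constructor
  · rintro ⟨x, hmem, hle, hlt⟩
    obtain ⟨hx0, hxn, he⟩ := (pv_mem_firstZeros_of_notD xs hD x).mp hmem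
    exact Or.inl ⟨x.toNat, by omega, he, by omega⟩
  · rintro (⟨j, hj, he, hc⟩ | hr)
    · refine ⟨(j : Int), ?_, by simp; omega, by simp; omega⟩
      obtain ⟨h1, h2⟩ := pv_edge_of_mem xs j he
      exact (pv_mem_firstZeros_of_notD xs hD (j : Int)).mpr ⟨by positivity, by simpa using h2, by simpa using he⟩
    · exact absurd hr (by omega)

theorem main_unchanged (xs : List Int) (hD : ¬ D_get_condition_type2 xs) :
    get_condition_type2 xs = get_condition_type2_alt xs := by
  rw [pv_alt_eq]
  rw [get_condition_type2]
  have hl : ∀ x ∈ (PySem.List.enumerate xs).filterMap (fun p =>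
      if PySem.List.pyGet? xs p.1 = some 0 ∧ PySem.List.pyGet? xs (p.1 - 1) = some 1
      then some p.1 else none), 0 ≤ x ∧ x.toNat < xs.length := by
    intro x hx
    obtain ⟨k, hk, rfl, -, -⟩ := (pv_mem_firstZeros xs x).mp hx
    exact ⟨by positivity, by simpa using hk⟩
  obtain ⟨hlenA, hgetA⟩ := pv_foldA xs.length _ xs rfl hl
  apply List.ext_getElem?
  intro i
  rcases Nat.lt_or_ge i xs.length with hi | hi
  · rw [hgetA i hi, pv_cov_eq_any xs hD i,
      pv_bref_get xs none 0 i le_rfl (by norm_num) hi]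
  · rw [List.getElem?_eq_none (by rw [hlenA]; omega),
      List.getElem?_eq_none (by rw [pv_bref_length]; omega)]

theorem main_tight (xs : List Int) (hD : D_get_condition_type2 xs) :
    get_condition_type2 xs ≠ get_condition_type2_alt xs := by
  intro heq
  have hn : 0 < xs.length := by
    rcases xs with - | ⟨y, ys⟩
    · simp [D_get_condition_type2] at hD
    · simp
  have hl : ∀ x ∈ (PySem.List.enumerate xs).filterMap (fun p =>
      if PySem.List.pyGet? xs p.1 = some 0 ∧ PySem.List.pyGet? xs (p.1 - 1) = some 1
      then some p.1 else none), 0 ≤ x ∧ x.toNat < xs.length := by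
    intro x hx
    obtain ⟨k, hk, rfl, -, -⟩ := (pv_mem_firstZeros xs x).mp hx
    exact ⟨by positivity, by simpa using hk⟩
  obtain ⟨hlenA, hgetA⟩ := pv_foldA xs.length _ xs rfl hl
  have hmem0 : (0 : Int) ∈ (PySem.List.enumerate xs).filterMap (fun p =>
      if PySem.List.pyGet? xs p.1 = some 0 ∧ PySem.List.pyGet? xs (p.1 - 1) = some 1
      then some p.1 else none) := by
    apply (pv_mem_firstZeros xs 0).mpr
    refine ⟨0, hn, rfl, ?_, ?_⟩
    · rw [show ((0 : Nat) : Int) = 0 by norm_num, PySem.List.pyGet?_zero]; exact hD.1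
    · rw [show ((0 : Nat) : Int) - 1 = (-1 : Int) by norm_num, PySem.List.pyGet?_neg_one]; exact hD.2
  have hA0 : (get_condition_type2 xs)[0]? = some 1 := by
    rw [get_condition_type2]
    rw [hgetA 0 hn]
    rw [if_pos]
    rw [List.any_eq_true]
    exact ⟨0, hmem0, by simp⟩
  have hB0 : (get_condition_type2_alt xs)[0]? = some 0 := by
    rw [pv_alt_eq, pv_bref_get xs none 0 0 le_rfl (by norm_num) hn]
    rw [if_neg (by simp [pvCovB, pvEdgeB])]
    rw [List.getElem?_eq_some_iff]
    refine ⟨hn, ?_⟩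
    have := hD.1
    rw [List.getElem?_eq_some_iff] at this
    exact this.2
  rw [heq, hB0] at hA0
  simp at hA0

-- ===== VERDICT (by name: the statement is the Claim_ definition above) =====
theorem get_condition_type2_spec : Claim_unchanged_get_condition_type2 := by
  intro FACondRaw _ hD
  exact main_unchanged FACondRaw hD

theorem get_condition_type2_changed : Claim_changed_get_condition_type2 := by
  unfold Claim_changed_get_condition_type2; decide

theorem get_condition_type2_tight : Claim_exact_get_condition_type2 := by
  intro FACondRaw _ hD
  exact main_tight FACondRaw hD
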